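-- pv_equiv track=rewrite | github.com/rar-file/anonimize | src/anonimize/anonymizers/credit_card.py | _fix_luhn
-- ===== SOURCE A (Python) =====
-- def _fix_luhn(card_number: str) -> str:
--     """Adjust last digit to make Luhn valid."""
--     digits = [int(d) for d in card_number[:-1]]
--     checksum = 0
--
--     # Reverse for Luhn
--     for i, d in enumerate(reversed(digits)):
--         if i % 2 == 0:
--             d *= 2
--             if d > 9:
--                 d -= 9
--         checksum += d
--
--     check_digit = (10 - (checksum % 10)) % 10
--     return ''.join(map(str, digits)) + str(check_digit)
-- ===== SOURCE B (Python) =====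
-- def _luhn_valid(ds):
--     """Is the full digit sequence Luhn-valid?"""
--     total = 0
--     for i, d in enumerate(reversed(ds)):
--         if i % 2 == 1:
--             q, r = divmod(2 * d, 10)
--             d = q + r
--         total += d
--     return total % 10 == 0
--
--
-- def _fix_luhn(card_number: str) -> str:
--     """Adjust last digit to make Luhn valid."""
--     digits = [int(d) for d in card_number[:-1]]
--     body = ''.join(map(str, digits))
--     for check in range(10):
--         if _luhn_valid(digits + [check]):
--             return body + str(check)
--     return body  # unreachable: some check digit always validates
-- ===== Notes on version B (the rewrite author's own statement) =====
-- stated objective: alternative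
-- what changed: Replaces A's direct checksum-then-formula computation of the check digit by a generate-and-test search: B tries each candidate check digit 0..9 and returns the first one for which the full number passes a standalone Luhn validity test (whose doubled digits are reduced with divmod digit-sums), correct because exactly one candidate validates.
import Mathlib
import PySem

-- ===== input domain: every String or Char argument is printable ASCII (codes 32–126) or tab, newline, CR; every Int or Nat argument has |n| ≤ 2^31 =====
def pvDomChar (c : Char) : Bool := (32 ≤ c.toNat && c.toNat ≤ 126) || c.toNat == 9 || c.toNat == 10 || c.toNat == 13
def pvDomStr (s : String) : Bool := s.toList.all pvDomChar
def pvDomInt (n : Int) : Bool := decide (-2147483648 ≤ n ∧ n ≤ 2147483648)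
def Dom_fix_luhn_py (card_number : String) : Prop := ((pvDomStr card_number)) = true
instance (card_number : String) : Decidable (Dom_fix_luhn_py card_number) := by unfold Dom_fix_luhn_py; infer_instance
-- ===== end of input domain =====

-- B replaces A's checksum-then-formula derivation of the check digit by a
-- generate-and-test search over candidates 0..9 against a standalone Luhn
-- validity predicate (doubled digits reduced via divmod digit sums); same
-- result since exactly one candidate validates, similar cost.


-- ===== PORT A =====
-- digits = [int(d) for d in card_number[:-1]]; int(single char) = PySem.Int.ofChars? [c]
-- (none = ValueError, excluded by Pre_; the .getD 0 default is never reached inside Pre_)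
def fix_luhn_py (card_number : String) : String :=
  let digits : List Int :=
    (PySem.Str.slice card_number none (some (-1))).toList.map
      (fun c => (PySem.Int.ofChars? [c]).getD 0)
  let checksum : Int :=
    (PySem.List.enumerate digits.reverse 0).foldl
      (fun checksum p =>
        if PySem.Int.mod p.1 2 = 0 then
          let d := p.2 * 2
          let d := if d > 9 then d - 9 else d
          checksum + d
        else checksum + p.2) 0
  let check_digit := PySem.Int.mod (10 - PySem.Int.mod checksum 10) 10
  String.ofList (PySem.Chars.join [] (digits.map PySem.Int.toChars) ++ PySem.Int.toChars check_digit)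

-- ===== PORT B =====
-- _luhn_valid(ds): q, r = divmod(2*d, 10) — divisor 10 ≠ 0, so divmod? is never none
def luhn_valid (ds : List Int) : Bool :=
  let total : Int :=
    (PySem.List.enumerate ds.reverse 0).foldl
      (fun total p =>
        if PySem.Int.mod p.1 2 = 1 then
          let qr := (PySem.Int.divmod? (2 * p.2) 10).getD (0, 0)
          total + (qr.1 + qr.2)
        else total + p.2) 0
  PySem.Int.mod total 10 == 0

-- for check in range(10): if _luhn_valid(digits + [check]): return body + str(check)
-- the trailing 'return body' branch is Python's fall-off (never reached: one candidate always validates)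
def fix_luhn_py_alt (card_number : String) : String :=
  let digits : List Int :=
    (PySem.Str.slice card_number none (some (-1))).toList.map
      (fun c => (PySem.Int.ofChars? [c]).getD 0)
  let body := PySem.Chars.join [] (digits.map PySem.Int.toChars)
  match (PySem.List.pyRange 0 10 1).find? (fun check => luhn_valid (digits ++ [check])) with
  | some check => String.ofList (body ++ PySem.Int.toChars check)
  | none => String.ofList body

-- ===== PRECONDITION & SPEC =====
-- Pre_ admits exactly the inputs where A returns: every char of card_number[:-1] must be a
-- decimal digit, else int(d) raises ValueError (a lone sign/space char is not int-able).
def Pre_fix_luhn_py (card_number : String) : Prop :=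
  (card_number.toList.dropLast.all
    (fun c => ['0', '1', '2', '3', '4', '5', '6', '7', '8', '9'].contains c)) = true
instance (card_number : String) : Decidable (Pre_fix_luhn_py card_number) := by
  unfold Pre_fix_luhn_py; infer_instance

def pvWitness_fix_luhn_py : String := "427"

def Spec_fix_luhn_py (card_number : String) (out : String) : Prop := out = fix_luhn_py_alt card_number
instance (card_number : String) (out : String) : Decidable (Spec_fix_luhn_py card_number out) := by unfold Spec_fix_luhn_py; infer_instance

-- ===== CLAIM (what is proved, stated in full; the proofs are below) =====
def Claim_equal_fix_luhn_py : Prop := ∀ (card_number : String), Dom_fix_luhn_py card_number → Pre_fix_luhn_py card_number → Spec_fix_luhn_py card_number (fix_luhn_py card_number)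

-- ===== LEMMAS AND PROOFS =====

-- the Luhn contribution of one doubled digit (0 ≤ d ≤ 9)
def tabVal (a : Int) : Int := if a * 2 > 9 then a * 2 - 9 else a * 2

-- the common value of both checksums over a reversed digit list, doubling
-- positions 0, 2, 4, … (the shape both loops consume: two digits at a time)
def luhnS : List Int → Int
  | [] => 0
  | [a] => tabVal a
  | a :: b :: t => tabVal a + b + luhnS t

-- A's parity fold (started at an even index) computes luhnS
lemma a_fold (l : List Int) :
    ∀ (m : Nat) (acc : Int),
      (PySem.List.enumerate l (2 * (m : Int))).foldl
        (fun checksum p =>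
          if PySem.Int.mod p.1 2 = 0 then
            let d := p.2 * 2
            let d := if d > 9 then d - 9 else d
            checksum + d
          else checksum + p.2) acc = acc + luhnS l := by
  induction l using luhnS.induct with
  | case1 => simp [PySem.List.enumerate, luhnS]
  | case2 a =>
    intro m acc
    have hm : PySem.Int.mod (2 * (m : Int)) 2 = 0 := by
      rw [PySem.Int.mod_eq_emod_of_pos (by norm_num : (0:Int) < 2)]; omega
    simp only [PySem.List.enumerate_cons, PySem.List.enumerate_nil, List.foldl_cons,
      List.foldl_nil]
    rw [if_pos hm]
    simp [luhnS, tabVal]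
  | case3 a b t ih =>
    intro m acc
    specialize ih (m + 1)
    have hm : PySem.Int.mod (2 * (m : Int)) 2 = 0 := by
      rw [PySem.Int.mod_eq_emod_of_pos (by norm_num : (0:Int) < 2)]; omega
    have hm1 : ¬ PySem.Int.mod (2 * (m : Int) + 1) 2 = 0 := by
      rw [PySem.Int.mod_eq_emod_of_pos (by norm_num : (0:Int) < 2)]; omega
    simp only [PySem.List.enumerate_cons, List.foldl_cons]
    rw [if_pos hm, if_neg hm1,
      show (2 * (m : Int) + 1 + 1) = 2 * ((m + 1 : Nat) : Int) by push_cast; ring, ih]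
    simp only [luhnS, tabVal]
    split_ifs <;> ring

-- divmod(2d, 10) digit sum equals tabVal for a decimal digit
lemma divmod_tabVal (a : Int) (h0 : 0 ≤ a) (h9 : a ≤ 9) :
    ((PySem.Int.divmod? (2 * a) 10).getD (0, 0)).1
      + ((PySem.Int.divmod? (2 * a) 10).getD (0, 0)).2 = tabVal a := by
  interval_cases a <;> decide

-- B's validity fold (started at an odd index) also computes luhnS
lemma b_fold (l : List Int) (hb : ∀ d ∈ l, 0 ≤ d ∧ d ≤ 9) :
    ∀ (m : Nat) (acc : Int),
      (PySem.List.enumerate l (2 * (m : Int) + 1)).foldl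
        (fun total p =>
          if PySem.Int.mod p.1 2 = 1 then
            let qr := (PySem.Int.divmod? (2 * p.2) 10).getD (0, 0)
            total + (qr.1 + qr.2)
          else total + p.2) acc = acc + luhnS l := by
  induction l using luhnS.induct with
  | case1 => simp [PySem.List.enumerate, luhnS]
  | case2 a =>
    intro m acc
    have ha := hb a (by simp)
    have hm : PySem.Int.mod (2 * (m : Int) + 1) 2 = 1 := by
      rw [PySem.Int.mod_eq_emod_of_pos (by norm_num : (0:Int) < 2)]; omega
    simp only [PySem.List.enumerate_cons, PySem.List.enumerate_nil, List.foldl_cons,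
      List.foldl_nil]
    rw [if_pos hm]
    simp [luhnS, divmod_tabVal a ha.1 ha.2]
  | case3 a b t ih =>
    intro m acc
    have ha := hb a (by simp)
    specialize ih (fun d hd => hb d (by simp [hd])) (m + 1)
    have hm : PySem.Int.mod (2 * (m : Int) + 1) 2 = 1 := by
      rw [PySem.Int.mod_eq_emod_of_pos (by norm_num : (0:Int) < 2)]; omega
    have hm1 : ¬ PySem.Int.mod (2 * (m : Int) + 1 + 1) 2 = 1 := by
      rw [PySem.Int.mod_eq_emod_of_pos (by norm_num : (0:Int) < 2)]; omega
    simp only [PySem.List.enumerate_cons, List.foldl_cons]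
    rw [if_pos hm, if_neg hm1,
      show (2 * (m : Int) + 1 + 1 + 1) = 2 * ((m + 1 : Nat) : Int) + 1 by push_cast; ring, ih]
    rw [divmod_tabVal a ha.1 ha.2]
    simp only [luhnS]
    ring

-- B's validity test on digits ++ [c] is a congruence of c + luhnS digits.reverse mod 10
lemma valid_iff (digits : List Int) (hb : ∀ d ∈ digits, 0 ≤ d ∧ d ≤ 9) (c : Int) :
    luhn_valid (digits ++ [c])
      = (((c + luhnS digits.reverse) % 10) == 0) := by
  unfold luhn_valid
  have hrev : (digits ++ [c]).reverse = c :: digits.reverse := by simp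
  have hm0 : ¬ PySem.Int.mod (0 : Int) 2 = 1 := by decide
  rw [hrev]
  simp only [PySem.List.enumerate_cons, List.foldl_cons]
  rw [if_neg hm0,
    show ((0 : Int) + 1) = 2 * ((0 : Nat) : Int) + 1 by norm_num,
    b_fold digits.reverse (fun d hd => hb d (List.mem_reverse.mp hd)) 0 (0 + c)]
  rw [PySem.Int.mod_eq_emod_of_pos (by norm_num : (0:Int) < 10)]
  norm_num [add_comm]

-- find? returns the unique satisfying element of the list
lemma find_first_mem {α : Type} (p : α → Bool) :
    ∀ (l : List α) (k : α), k ∈ l → p k = true →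
      (∀ j ∈ l, p j = true → j = k) → l.find? p = some k := by
  intro l
  induction l with
  | nil => intro k hk; cases hk
  | cons a t ih =>
    intro k hk hpk huniq
    by_cases hpa : p a = true
    · have : a = k := huniq a (by simp) hpa
      subst this
      simp [List.find?_cons_of_pos hpa]
    · rw [List.find?_cons_of_neg hpa]
      have hkt : k ∈ t := by
        rcases List.mem_cons.mp hk with rfl | h
        · exact absurd hpk hpa
        · exact h
      exact ih k hkt hpk (fun j hj => huniq j (List.mem_cons_of_mem a hj))

-- a digit char parses to a value in [0, 9]
lemma digit_val_bounds (c : Char)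
    (h : c ∈ ['0', '1', '2', '3', '4', '5', '6', '7', '8', '9']) :
    0 ≤ (PySem.Int.ofChars? [c]).getD 0 ∧ (PySem.Int.ofChars? [c]).getD 0 ≤ 9 := by
  fin_cases h <;> decide

-- ===== VERDICT (by name: the statement is the Claim_ definition above) =====
theorem fix_luhn_py_spec : Claim_equal_fix_luhn_py := by
  intro cn _ pre
  have pre' : ∀ c ∈ cn.toList.dropLast,
      c ∈ ['0', '1', '2', '3', '4', '5', '6', '7', '8', '9'] := by
    simpa [Pre_fix_luhn_py, List.all_eq_true] using pre
  unfold Spec_fix_luhn_py fix_luhn_py fix_luhn_py_alt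
  simp only []
  have hchars : (PySem.Str.slice cn none (some (-1))).toList = cn.toList.dropLast :=
    PySem.Str.slice_to_neg_one cn
  set digits := (PySem.Str.slice cn none (some (-1))).toList.map
    (fun c => (PySem.Int.ofChars? [c]).getD 0) with hdg
  have hb : ∀ d ∈ digits, 0 ≤ d ∧ d ≤ 9 := by
    intro d hd'
    rw [hdg, hchars] at hd'
    obtain ⟨c, hc, rfl⟩ := List.mem_map.mp hd'
    exact digit_val_bounds c (pre' c hc)
  set S := luhnS digits.reverse with hS
  have hA : (PySem.List.enumerate digits.reverse 0).foldl
      (fun checksum p =>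
        if PySem.Int.mod p.1 2 = 0 then
          let d := p.2 * 2
          let d := if d > 9 then d - 9 else d
          checksum + d
        else checksum + p.2) 0 = S := by
    have := a_fold digits.reverse 0 0
    simpa using this
  rw [hA]
  clear_value S
  set k := PySem.Int.mod (10 - PySem.Int.mod S 10) 10 with hk
  have hk' : k = (10 - S % 10) % 10 := by
    rw [hk, PySem.Int.mod_eq_emod_of_pos (by norm_num : (0:Int) < 10),
      PySem.Int.mod_eq_emod_of_pos (by norm_num : (0:Int) < 10)]
  have hkb : 0 ≤ k ∧ k < 10 := by rw [hk']; omega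
  have hp : ∀ c : Int, luhn_valid (digits ++ [c]) = (((c + S) % 10) == 0) :=
    fun c => by rw [hS]; exact valid_iff digits hb c
  have hfind : (PySem.List.pyRange 0 10 1).find?
      (fun check => luhn_valid (digits ++ [check])) = some k := by
    apply find_first_mem
    · exact PySem.List.mem_pyRange_one.mpr ⟨hkb.1, hkb.2⟩
    · rw [hp k, hk']
      simp only [beq_iff_eq]
      omega
    · intro j hj hpj
      have hjb := PySem.List.mem_pyRange_one.mp hj
      rw [hp j] at hpj
      simp only [beq_iff_eq] at hpj
      rw [hk']
      omega
  rw [hfind]
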